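-- pv_equiv track=rewrite | github.com/GeorgyPyanov/Optimal-Maintenance-Scheduling-for-Short-Term-Rental-Properties | src/greedy_algorithms.py | get_dfs_tour
-- ===== SOURCE A (Python) =====
-- from typing import List, Tuple
-- from collections import defaultdict
--
-- def get_dfs_tour(edges: List[Tuple[int, int]]) -> List[int]:
--     adj = defaultdict(list)
--     for u, v in edges:
--         adj[u].append(v)
--         adj[v].append(u)
--
--     visited = set()
--     tour = []
--
--     def dfs(node):
--         visited.add(node)
--         tour.append(node)
--         for neighbor in sorted(adj[node]):
--             if neighbor not in visited:
--                 dfs(neighbor)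
--
--     dfs(0)
--     tour.append(0)
--     return tour
-- ===== SOURCE B (Python) =====
-- from typing import List, Tuple
-- from collections import defaultdict
--
-- def get_dfs_tour(edges: List[Tuple[int, int]]) -> List[int]:
--     adj = defaultdict(list)
--     for u, v in edges:
--         adj[u].append(v)
--         adj[v].append(u)
--
--     visited = set()
--     tour = []
--     stack = [0]
--     while stack:
--         node = stack.pop()
--         if node in visited:
--             continue
--         visited.add(node)
--         tour.append(node)
--         stack.extend(sorted(adj[node], reverse=True))
--     tour.append(0)
--     return tour
-- ===== Notes on version B (the rewrite author's own statement) =====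
-- stated objective: idiomatic
-- what changed: Replaces the recursive nested dfs with closure-mutated state by an iterative DFS using an explicit stack (pop a node, skip if visited, push its neighbors in descending order so the smallest is visited first), producing the same preorder tour.
import Mathlib
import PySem

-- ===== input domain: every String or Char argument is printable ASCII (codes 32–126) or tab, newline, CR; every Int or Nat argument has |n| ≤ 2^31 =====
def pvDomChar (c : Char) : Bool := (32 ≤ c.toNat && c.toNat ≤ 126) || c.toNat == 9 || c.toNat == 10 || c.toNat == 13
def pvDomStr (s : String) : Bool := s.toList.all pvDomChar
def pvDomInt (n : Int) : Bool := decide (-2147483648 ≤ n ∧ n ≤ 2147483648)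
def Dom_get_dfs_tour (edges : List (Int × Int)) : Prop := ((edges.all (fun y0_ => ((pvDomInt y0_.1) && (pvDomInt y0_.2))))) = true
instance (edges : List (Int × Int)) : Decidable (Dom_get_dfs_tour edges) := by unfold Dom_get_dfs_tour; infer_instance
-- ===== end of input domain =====

-- B replaces the recursive dfs (closure-mutated visited/tour) by an iterative DFS with an
-- explicit stack; same return value, same cost (objective: idiomatic, no speed claim).

-- ===== PORT A =====
-- adjacency dict: for u, v in edges: adj[u].append(v); adj[v].append(u)  (defaultdict(list))
def pvAdj (edges : List (Int × Int)) : PySem.Dict Int (List Int) :=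
  edges.foldl
    (fun d p => (d.modify p.1 [] (· ++ [p.2])).modify p.2 [] (· ++ [p.1]))
    PySem.Dict.empty

-- the recursive dfs: state = (visited, tour); fuel is only a termination guard (never
-- exhausted: proved below, the port's fuel 2*|edges|+2 bounds the number of dfs calls)
def pvDfsA (adj : PySem.Dict Int (List Int)) :
    Nat → Int → (PySem.Set Int × List Int) → Option (PySem.Set Int × List Int)
  | 0, _, _ => none
  | f + 1, node, s =>
    let s1 : PySem.Set Int × List Int := (PySem.Set.add s.1 node, s.2 ++ [node])
    (PySem.List.sorted (adj.getD node []) (fun x => x) false).foldlM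
      (fun t nb => if PySem.Set.contains t.1 nb then some t else pvDfsA adj f nb t) s1

def get_dfs_tour (edges : List (Int × Int)) : List Int :=
  let adj := pvAdj edges
  match pvDfsA adj (2 * edges.length + 2) 0 (PySem.Set.empty, []) with
  | some s => s.2 ++ [0]
  | none => [0]   -- fuel guard only; unreachable

-- ===== PORT B =====
-- the while loop; the Python stack's top is the list END ('pop'/'extend'), modelled here
-- with the head as top: 'extend(sorted(.., reverse=True))' pushes that list reversed.
-- fuel decreases only when a node is visited (a termination guard, never exhausted).
def pvLoopB (adj : PySem.Dict Int (List Int)) :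
    Nat → List Int → PySem.Set Int → List Int → Option (List Int)
  | _, [], _, tour => some tour
  | fuel, n :: st, visited, tour =>
    if PySem.Set.contains visited n then pvLoopB adj fuel st visited tour
    else
      match fuel with
      | 0 => none
      | f + 1 =>
        pvLoopB adj f ((PySem.List.sorted (adj.getD n []) (fun x => x) true).reverse ++ st)
          (PySem.Set.add visited n) (tour ++ [n])
  termination_by fuel stack _ _ => (fuel, stack.length)

def get_dfs_tour_alt (edges : List (Int × Int)) : List Int :=
  let adj := pvAdj edges
  ((pvLoopB adj (2 * edges.length + 2) [0] PySem.Set.empty []).getD []) ++ [0]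

-- ===== PRECONDITION & SPEC =====
def Spec_get_dfs_tour (edges : List (Int × Int)) (out : List Int) : Prop := out = get_dfs_tour_alt edges
instance (edges : List (Int × Int)) (out : List Int) : Decidable (Spec_get_dfs_tour edges out) := by unfold Spec_get_dfs_tour; infer_instance

-- ===== CLAIM (what is proved, stated in full; the proofs are below) =====
def Claim_equal_get_dfs_tour : Prop := ∀ (edges : List (Int × Int)), Dom_get_dfs_tour edges → Spec_get_dfs_tour edges (get_dfs_tour edges)

-- ===== LEMMAS AND PROOFS =====

-- node universe: 0 and every edge endpoint (distinct, in order)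
def pvU (edges : List (Int × Int)) : List Int :=
  PySem.Set.ofList (0 :: edges.flatMap (fun p => [p.1, p.2]))

-- number of not-yet-visited universe nodes (the fuel measure)
def pvUnvis (U : List Int) (v : PySem.Set Int) : Nat :=
  (U.filter (fun x => !PySem.Set.contains v x)).length

theorem pvContains_add (v : PySem.Set Int) (n x : Int) :
    PySem.Set.contains (PySem.Set.add v n) x = (PySem.Set.contains v x || x == n) := by
  simp [PySem.Set.add_eq_ite]
  split_ifs with h
  · by_cases hx : x = n <;> simp_all
  · simp [beq_eq_decide]

theorem pvUnvis_mono (U : List Int) (v v' : PySem.Set Int)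
    (h : ∀ x, x ∈ v → x ∈ v') : pvUnvis U v' ≤ pvUnvis U v := by
  apply List.Sublist.length_le
  apply List.monotone_filter_right
  intro x hx
  simp only [Bool.not_eq_true'] at *
  by_cases hv : x ∈ v
  · exact absurd (h x hv) (by simpa using hx)
  · simpa using hv

theorem pvUnvis_pos (U : List Int) (v : PySem.Set Int) (n : Int)
    (hn : n ∈ U) (hv : n ∉ v) : 1 ≤ pvUnvis U v := by
  have h : n ∈ U.filter (fun x => !PySem.Set.contains v x) := by
    simp [List.mem_filter, hn, hv]
  exact List.length_pos_of_mem h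

theorem pvFilter_drop_one (p : Int → Bool) (n : Int) :
    ∀ U : List Int, U.Nodup → n ∈ U → p n = true →
    (U.filter (fun x => p x && !(x == n))).length + 1 = (U.filter p).length := by
  intro U
  induction U with
  | nil => intro _ h; simp at h
  | cons u U ih =>
    intro hU hn hp
    have hU' := (List.nodup_cons.1 hU).2
    by_cases hu : u = n
    · subst hu
      have hnotU : u ∉ U := (List.nodup_cons.1 hU).1
      have e : U.filter (fun x => p x && !(x == u)) = U.filter p := by
        apply List.filter_congr
        intro x hx
        have : (x == u) = false := by
          simp only [beq_eq_false_iff_ne]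
          exact fun e => hnotU (e ▸ hx)
        simp [this]
      rw [List.filter_cons, List.filter_cons, e]
      simp [hp]
    · have hn' : n ∈ U := by
        rcases List.mem_cons.1 hn with h | h
        · exact absurd h.symm hu
        · exact h
      rw [List.filter_cons, List.filter_cons]
      have e : (p u && !(u == n)) = p u := by
        have : (u == n) = false := by simpa using hu
        simp [this]
      rw [e]
      split_ifs with hc
      · simpa using ih hU' hn' hp
      · exact ih hU' hn' hp

theorem pvUnvis_add (U : List Int) (v : PySem.Set Int) (n : Int)
    (hU : U.Nodup) (hn : n ∈ U) (hv : n ∉ v) :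
    pvUnvis U (PySem.Set.add v n) + 1 = pvUnvis U v := by
  unfold pvUnvis
  have e : (fun x => !PySem.Set.contains (PySem.Set.add v n) x)
      = (fun x => (!PySem.Set.contains v x) && !(x == n)) := by
    funext x
    rw [pvContains_add]
    simp
  rw [e]
  exact pvFilter_drop_one _ n U hU hn (by simpa [PySem.Set.contains_iff] using hv)

-- one edge's contribution to the adjacency dict
theorem pvAdj_step (d : PySem.Dict Int (List Int)) (e : Int × Int) (k n : Int)
    (h : n ∈ ((d.modify e.1 [] (· ++ [e.2])).modify e.2 [] (· ++ [e.1])).getD k []) :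
    n ∈ d.getD k [] ∨ n = e.1 ∨ n = e.2 := by
  rw [PySem.Dict.getD_modify] at h
  by_cases hk2 : k = e.2
  · rw [if_pos hk2, PySem.Dict.getD_modify] at h
    by_cases he : e.2 = e.1
    · rw [if_pos he] at h
      rcases List.mem_append.1 h with h | h
      · rcases List.mem_append.1 h with h | h
        · rw [hk2, he]; exact Or.inl h
        · exact Or.inr (Or.inr (List.mem_singleton.1 h))
      · exact Or.inr (Or.inl (List.mem_singleton.1 h))
    · rw [if_neg he] at h
      rcases List.mem_append.1 h with h | h
      · rw [hk2]; exact Or.inl h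
      · exact Or.inr (Or.inl (List.mem_singleton.1 h))
  · rw [if_neg hk2, PySem.Dict.getD_modify] at h
    by_cases hk1 : k = e.1
    · rw [if_pos hk1, ← hk1] at h
      rcases List.mem_append.1 h with h | h
      · exact Or.inl h
      · exact Or.inr (Or.inr (List.mem_singleton.1 h))
    · rw [if_neg hk1] at h
      exact Or.inl h

theorem pvAdj_aux (es : List (Int × Int)) (d : PySem.Dict Int (List Int)) (k n : Int)
    (h : n ∈ (es.foldl
        (fun d p => (d.modify p.1 [] (· ++ [p.2])).modify p.2 [] (· ++ [p.1])) d).getD k []) :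
    n ∈ d.getD k [] ∨ n ∈ es.flatMap (fun p => [p.1, p.2]) := by
  induction es generalizing d with
  | nil => simp only [List.foldl_nil] at h; exact Or.inl h
  | cons e es ih =>
    rw [List.foldl_cons] at h
    rcases ih _ h with h2 | h2
    · rcases pvAdj_step d e k n h2 with h3 | h3 | h3 <;> simp [h3]
    · simp [h2]

-- members of adjacency lists lie in the universe
theorem pvAdj_mem_U (edges : List (Int × Int)) (k n : Int)
    (h : n ∈ (pvAdj edges).getD k []) : n ∈ pvU edges := by
  rcases pvAdj_aux edges PySem.Dict.empty k n h with h2 | h2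
  · simp [PySem.Dict.getD_empty] at h2
  · unfold pvU
    rw [PySem.Set.mem_ofList]
    exact List.mem_cons_of_mem _ h2

-- pushing sorted(xs, reverse=True) reversed puts the neighbors in ascending order
theorem pvSortedRev (xs : List Int) :
    (PySem.List.sorted xs (fun x => x) true).reverse = PySem.List.sorted xs (fun x => x) false := by
  refine (PySem.List.sorted_id_eq_of_perm_of_pairwise _ _ ?_ ?_).symm
  · exact (List.reverse_perm _).trans (PySem.List.sorted_perm xs (fun x => x) true)
  · rw [List.pairwise_reverse]
    exact PySem.List.sorted_pairwise_rev (xs := xs) (key := fun x => x)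

-- step-case equations of B's fueled loop
theorem pvLoopB_nil (adj : PySem.Dict Int (List Int)) (f : Nat) (v : PySem.Set Int) (t : List Int) :
    pvLoopB adj f [] v t = some t := by simp [pvLoopB]

theorem pvLoopB_skip (adj : PySem.Dict Int (List Int)) (f : Nat) (n : Int) (st : List Int)
    (v : PySem.Set Int) (t : List Int) (h : n ∈ v) :
    pvLoopB adj f (n :: st) v t = pvLoopB adj f st v t := by
  rw [pvLoopB.eq_def]; simp [h]

theorem pvLoopB_visit (adj : PySem.Dict Int (List Int)) (f : Nat) (n : Int) (st : List Int)
    (v : PySem.Set Int) (t : List Int) (h : n ∉ v) :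
    pvLoopB adj (f + 1) (n :: st) v t
      = pvLoopB adj f ((PySem.List.sorted (adj.getD n []) (fun x => x) true).reverse ++ st)
          (PySem.Set.add v n) (t ++ [n]) := by
  rw [pvLoopB.eq_def]; simp [h]

theorem pvLoopB_zero (adj : PySem.Dict Int (List Int)) (n : Int) (st : List Int)
    (v : PySem.Set Int) (t : List Int) (h : n ∉ v) :
    pvLoopB adj 0 (n :: st) v t = none := by
  rw [pvLoopB.eq_def]; simp [h]

-- fuel monotonicity of B's loop (hence determinism of the returned value)
theorem pvLoopB_mono (adj : PySem.Dict Int (List Int)) :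
    ∀ f st (v : PySem.Set Int) (t : List Int) r f', pvLoopB adj f st v t = some r → f ≤ f' →
      pvLoopB adj f' st v t = some r := by
  intro f
  induction f using Nat.strong_induction_on with
  | _ f IH =>
    intro st
    induction st with
    | nil =>
      intro v t r f' h _
      rw [pvLoopB_nil] at h
      rw [pvLoopB_nil]
      exact h
    | cons n st ihst =>
      intro v t r f' h hle
      by_cases hv : n ∈ v
      · rw [pvLoopB_skip _ _ _ _ _ _ hv] at h
        rw [pvLoopB_skip _ _ _ _ _ _ hv]
        exact ihst v t r f' h hle
      · cases f with
        | zero =>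
          rw [pvLoopB_zero _ _ _ _ _ hv] at h
          exact absurd h (by simp)
        | succ fv =>
          cases f' with
          | zero => omega
          | succ fv' =>
            rw [pvLoopB_visit _ _ _ _ _ _ hv] at h
            rw [pvLoopB_visit _ _ _ _ _ _ hv]
            exact IH fv (by omega) _ _ _ _ fv' h (by omega)

-- B's loop terminates given fuel ≥ #unvisited universe nodes and a stack inside the universe
theorem pvLoopB_total (adj : PySem.Dict Int (List Int)) (U : List Int)
    (hU : U.Nodup) (HU : ∀ k n, n ∈ adj.getD k [] → n ∈ U) :
    ∀ f st (v : PySem.Set Int) (t : List Int), (∀ m ∈ st, m ∈ U) → pvUnvis U v ≤ f →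
      ∃ r, pvLoopB adj f st v t = some r := by
  intro f
  induction f using Nat.strong_induction_on with
  | _ f IH =>
    intro st
    induction st with
    | nil =>
      intro v t _ _
      exact ⟨t, pvLoopB_nil adj f v t⟩
    | cons n st ihst =>
      intro v t hst hf
      have hnU : n ∈ U := hst n (List.mem_cons_self ..)
      have hstU : ∀ m ∈ st, m ∈ U := fun m hm => hst m (List.mem_cons_of_mem _ hm)
      by_cases hv : n ∈ v
      · obtain ⟨r, hr⟩ := ihst v t hstU hf
        exact ⟨r, by rw [pvLoopB_skip _ _ _ _ _ _ hv]; exact hr⟩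
      · have h1 := pvUnvis_pos U v n hnU hv
        cases f with
        | zero => omega
        | succ fv =>
          have hpush : ∀ m ∈ (PySem.List.sorted (adj.getD n []) (fun x => x) true).reverse ++ st,
              m ∈ U := by
            intro m hm
            rcases List.mem_append.1 hm with hm | hm
            · rw [List.mem_reverse, PySem.List.mem_sorted] at hm
              exact HU n m hm
            · exact hstU m hm
          have hf2 : pvUnvis U (PySem.Set.add v n) ≤ fv := by
            have := pvUnvis_add U v n hU hnU hv
            omega
          obtain ⟨r, hr⟩ := IH fv (by omega) _ (PySem.Set.add v n) (t ++ [n]) hpush hf2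
          exact ⟨r, by rw [pvLoopB_visit _ _ _ _ _ _ hv]; exact hr⟩

-- A's dfs terminates (returns some) given fuel ≥ #unvisited universe nodes; visited only grows
theorem pvDfsA_total (adj : PySem.Dict Int (List Int)) (U : List Int)
    (hU : U.Nodup) (HU : ∀ k n, n ∈ adj.getD k [] → n ∈ U) :
    ∀ f node (s : PySem.Set Int × List Int), node ∈ U → node ∉ s.1 → pvUnvis U s.1 ≤ f →
      ∃ out, pvDfsA adj f node s = some out ∧ ∀ x ∈ s.1, x ∈ out.1 := by
  intro f
  induction f using Nat.strong_induction_on with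
  | _ f IH =>
    intro node s hnU hnv hf
    have h1 := pvUnvis_pos U s.1 node hnU hnv
    cases f with
    | zero => omega
    | succ fv =>
      have hTF : ∀ ns : List Int, (∀ m ∈ ns, m ∈ U) → ∀ (s' : PySem.Set Int × List Int),
          pvUnvis U s'.1 ≤ fv →
          ∃ out, ns.foldlM
              (fun t nb => if PySem.Set.contains t.1 nb then some t else pvDfsA adj fv nb t)
              s' = some out ∧ ∀ x ∈ s'.1, x ∈ out.1 := by
        intro ns
        induction ns with
        | nil =>
          intro _ s' _
          exact ⟨s', by simp, fun x hx => hx⟩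
        | cons m ns ihns =>
          intro hns s' hs'
          have hmU : m ∈ U := hns m (List.mem_cons_self ..)
          have hnsU : ∀ x ∈ ns, x ∈ U := fun x hx => hns x (List.mem_cons_of_mem _ hx)
          by_cases hm : m ∈ s'.1
          · obtain ⟨out, hout, hgrow⟩ := ihns hnsU s' hs'
            refine ⟨out, ?_, hgrow⟩
            rw [List.foldlM_cons, if_pos ((PySem.Set.contains_iff _ _).2 hm)]
            simp only [Option.bind_eq_bind, Option.bind_some]
            exact hout
          · obtain ⟨s1, hs1, hgrow1⟩ := IH fv (by omega) m s' hmU hm hs'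
            have hs1f : pvUnvis U s1.1 ≤ fv :=
              le_trans (pvUnvis_mono U s'.1 s1.1 hgrow1) hs'
            obtain ⟨out, hout, hgrow2⟩ := ihns hnsU s1 hs1f
            refine ⟨out, ?_, fun x hx => hgrow2 x (hgrow1 x hx)⟩
            rw [List.foldlM_cons, if_neg (by simpa [PySem.Set.contains_iff] using hm)]
            rw [hs1]
            simpa using hout
      have hnbrs : ∀ m ∈ PySem.List.sorted (adj.getD node []) (fun x => x) false, m ∈ U := by
        intro m hm
        rw [PySem.List.mem_sorted] at hm
        exact HU node m hm
      have hf2 : pvUnvis U (PySem.Set.add s.1 node) ≤ fv := by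
        have := pvUnvis_add U s.1 node hU hnU hnv
        omega
      obtain ⟨out, hout, hgrow⟩ :=
        hTF _ hnbrs (PySem.Set.add s.1 node, s.2 ++ [node]) hf2
      refine ⟨out, ?_, fun x hx => hgrow x (PySem.Set.mem_add _ _ _ |>.2 (Or.inl hx))⟩
      simpa [pvDfsA] using hout

-- MAIN: running the stack loop on ns ++ rest first performs exactly A's visit sequence for ns
theorem pvMain (adj : PySem.Dict Int (List Int)) :
    ∀ f (ns : List Int) (s out : PySem.Set Int × List Int),
      ns.foldlM (fun t nb => if PySem.Set.contains t.1 nb then some t else pvDfsA adj f nb t) s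
        = some out →
      ∀ rest r g, pvLoopB adj g rest out.1 out.2 = some r →
      ∃ g', pvLoopB adj g' (ns ++ rest) s.1 s.2 = some r := by
  intro f
  induction f using Nat.strong_induction_on with
  | _ f IH =>
    intro ns
    induction ns with
    | nil =>
      intro s out h rest r g hb
      simp only [List.foldlM_nil, pure, Option.some.injEq] at h
      subst h
      exact ⟨g, by simpa using hb⟩
    | cons n ns ihns =>
      intro s out h rest r g hb
      rw [List.foldlM_cons] at h
      by_cases hv : n ∈ s.1
      · rw [if_pos ((PySem.Set.contains_iff _ _).2 hv)] at h
        simp only [Option.bind_eq_bind, Option.bind_some] at h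
        obtain ⟨g', hg'⟩ := ihns s out h rest r g hb
        exact ⟨g', by rw [List.cons_append, pvLoopB_skip _ _ _ _ _ _ hv]; exact hg'⟩
      · rw [if_neg (by simpa [PySem.Set.contains_iff] using hv)] at h
        simp only [Option.bind_eq_bind, Option.bind_eq_some_iff] at h
        obtain ⟨s1, hs1, hrest⟩ := h
        cases f with
        | zero => simp [pvDfsA] at hs1
        | succ fv =>
          rw [show pvDfsA adj (fv + 1) n s
              = (PySem.List.sorted (adj.getD n []) (fun x => x) false).foldlM
                  (fun t nb => if PySem.Set.contains t.1 nb then some t else pvDfsA adj fv nb t)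
                  (PySem.Set.add s.1 n, s.2 ++ [n]) from by simp [pvDfsA]] at hs1
          obtain ⟨g1, hg1⟩ := ihns s1 out hrest rest r g hb
          obtain ⟨g2, hg2⟩ := IH fv (by omega) _ _ _ hs1 (ns ++ rest) r g1 hg1
          refine ⟨g2 + 1, ?_⟩
          rw [List.cons_append, pvLoopB_visit _ _ _ _ _ _ hv, pvSortedRev]
          exact hg2

theorem pvU_card (edges : List (Int × Int)) : (pvU edges).length ≤ 2 * edges.length + 1 := by
  unfold pvU
  have h1 := PySem.Set.length_ofList_le (xs := 0 :: edges.flatMap (fun p => [p.1, p.2]))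
  have h2 : (edges.flatMap (fun p => [p.1, p.2])).length = 2 * edges.length := by
    induction edges with
    | nil => simp
    | cons e es ih => simp [List.flatMap_cons]; omega
  simp only [List.length_cons, h2] at h1
  omega

theorem pvUnvis_empty (U : List Int) : pvUnvis U PySem.Set.empty = U.length := by
  unfold pvUnvis
  have : ∀ x : Int, (!PySem.Set.contains PySem.Set.empty x) = true := by
    intro x; simp [PySem.Set.empty]
  rw [List.filter_eq_self.2 (fun x _ => this x)]

-- ===== VERDICT (by name: the statement is the Claim_ definition above) =====
theorem get_dfs_tour_spec : Claim_equal_get_dfs_tour := by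
  intro edges _
  unfold Spec_get_dfs_tour
  have hU : (pvU edges).Nodup := PySem.Set.nodup_ofList _
  have HU : ∀ k n, n ∈ (pvAdj edges).getD k [] → n ∈ pvU edges := pvAdj_mem_U edges
  have h0U : 0 ∈ pvU edges := by
    unfold pvU; rw [PySem.Set.mem_ofList]; exact List.mem_cons_self ..
  have h0v : (0 : Int) ∉ PySem.Set.empty := by simp [PySem.Set.empty]
  have hcard : pvUnvis (pvU edges) PySem.Set.empty ≤ 2 * edges.length + 2 := by
    rw [pvUnvis_empty]
    have := pvU_card edges
    omega
  obtain ⟨out, hA, _⟩ := pvDfsA_total (pvAdj edges) (pvU edges) hU HU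
    (2 * edges.length + 2) 0 (PySem.Set.empty, []) h0U h0v hcard
  have hfold : [(0 : Int)].foldlM
      (fun t nb => if PySem.Set.contains t.1 nb then some t
        else pvDfsA (pvAdj edges) (2 * edges.length + 2) nb t)
      ((PySem.Set.empty, []) : PySem.Set Int × List Int) = some out := by
    rw [List.foldlM_cons, if_neg (by simp [PySem.Set.empty]), hA]
    simp
  obtain ⟨g', hg'⟩ := pvMain (pvAdj edges) (2 * edges.length + 2) [0] (PySem.Set.empty, []) out
    hfold [] out.2 0 (pvLoopB_nil _ _ _ _)
  simp only [List.append_nil] at hg'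
  obtain ⟨r, hr⟩ := pvLoopB_total (pvAdj edges) (pvU edges) hU HU
    (2 * edges.length + 2) [0] PySem.Set.empty []
    (by intro m hm; rw [List.mem_singleton] at hm; rw [hm]; exact h0U) hcard
  have hdet : r = out.2 := by
    have e1 := pvLoopB_mono (pvAdj edges) g' [0] PySem.Set.empty [] out.2
      (max g' (2 * edges.length + 2)) hg' (le_max_left _ _)
    have e2 := pvLoopB_mono (pvAdj edges) (2 * edges.length + 2) [0] PySem.Set.empty [] r
      (max g' (2 * edges.length + 2)) hr (le_max_right _ _)
    rw [e1] at e2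
    exact (Option.some.injEq .. ▸ e2.symm : r = out.2)
  show (match pvDfsA (pvAdj edges) (2 * edges.length + 2) 0 (PySem.Set.empty, []) with
    | some s => s.2 ++ [0] | none => [0])
    = (pvLoopB (pvAdj edges) (2 * edges.length + 2) [0] PySem.Set.empty []).getD [] ++ [0]
  rw [hA, hr, hdet]
  rfl
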